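-- pv_equiv track=rewrite | github.com/pjjoy/python | study_homeworks/piljung/algorithm/level1/Exercise16_primenum.py | solution
-- ===== SOURCE A (Python) =====
-- def solution(n):
--     answer = 0
--     for x in range(2, n+1):
--         for j in range(2, x):
--             if x % j == 0:
--                 break   #아무것도 안하고 넘어감
--             else:
--                 answer += 1
--     return answer
-- ===== SOURCE B (Python) =====
-- def solution(n):
--     answer = 0
--     for x in range(2, n + 1):
--         d = 2
--         while d * d <= x:
--             if x % d == 0:
--                 break
--             d += 1
--         else:
--             d = x
--         answer += d - 2
--     return answer
-- ===== Notes on version B (the rewrite author's own statement) =====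
-- stated objective: faster
-- what changed: Instead of scanning all j in 2..x-1 and counting non-divisors until a break, B finds the smallest divisor d of x by trial division only up to sqrt(x) (falling back to d = x when none is found, i.e. x is prime) and adds d-2.
import Mathlib
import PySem

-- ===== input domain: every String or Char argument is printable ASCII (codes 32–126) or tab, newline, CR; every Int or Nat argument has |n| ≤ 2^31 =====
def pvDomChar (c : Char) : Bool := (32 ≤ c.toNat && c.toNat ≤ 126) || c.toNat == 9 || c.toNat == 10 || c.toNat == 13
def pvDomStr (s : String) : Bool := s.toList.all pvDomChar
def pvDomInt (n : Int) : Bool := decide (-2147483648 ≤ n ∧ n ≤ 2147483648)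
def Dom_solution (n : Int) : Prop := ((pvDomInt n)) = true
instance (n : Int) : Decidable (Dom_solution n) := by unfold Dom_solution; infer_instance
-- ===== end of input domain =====

-- B replaces A's inner scan of all j in 2..x-1 by trial division up to sqrt(x): it finds the
-- smallest divisor d of x (d = x when none ≤ sqrt(x) exists, i.e. x prime) and adds d - 2.

-- ===== PORT A =====
-- the inner 'for j in range(2, x): if x % j == 0: break else: answer += 1'
def solutionInner (x : Int) : List Int → Int → Int
  | [], answer => answer
  | j :: js, answer =>
    if PySem.Int.mod x j = 0 then answer
    else solutionInner x js (answer + 1)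

def solution (n : Int) : Int :=
  (PySem.List.pyRange 2 (n + 1) 1).foldl
    (fun answer x => solutionInner x (PySem.List.pyRange 2 x 1) answer) 0

-- ===== PORT B =====
-- the 'while d * d <= x: if x % d == 0: break; d += 1 else: d = x' loop, returning the final d
def solutionGo (x d : Int) : Int :=
  if h : d * d ≤ x then
    if PySem.Int.mod x d = 0 then d else solutionGo x (d + 1)
  else x
termination_by (x + 1 - d).toNat
decreasing_by
  have hd : d ≤ d * d := by nlinarith [mul_self_nonneg (d - 1)]
  omega

def solution_alt (n : Int) : Int :=
  (PySem.List.pyRange 2 (n + 1) 1).foldl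
    (fun answer x => answer + (solutionGo x 2 - 2)) 0

-- ===== PRECONDITION & SPEC =====
def Spec_solution (n : Int) (out : Int) : Prop := out = solution_alt n
instance (n : Int) (out : Int) : Decidable (Spec_solution n out) := by unfold Spec_solution; infer_instance

-- ===== CLAIM (what is proved, stated in full; the proofs are below) =====
def Claim_equal_solution : Prop := ∀ (n : Int), Dom_solution n → Spec_solution n (solution n)

-- ===== LEMMAS AND PROOFS =====

-- the smallest prime factor of x, as an Int
def spfI (x : Int) : Int := (x.toNat.minFac : Int)

lemma spfI_two_le {x : Int} (hx : 2 ≤ x) : 2 ≤ spfI x := by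
  have h1 : x.toNat ≠ 1 := by omega
  have := (Nat.minFac_prime h1).two_le
  unfold spfI; omega

lemma spfI_le {x : Int} (hx : 2 ≤ x) : spfI x ≤ x := by
  have := Nat.minFac_le (n := x.toNat) (by omega)
  unfold spfI; omega

lemma spfI_dvd {x : Int} (hx : 2 ≤ x) : spfI x ∣ x := by
  have h := Int.natCast_dvd_natCast.mpr (Nat.minFac_dvd x.toNat)
  rwa [Int.toNat_of_nonneg (by omega : (0:Int) ≤ x)] at h

lemma spfI_min {x k : Int} (hx : 2 ≤ x) (hk : 2 ≤ k) (hdvd : k ∣ x) : spfI x ≤ k := by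
  have hk' : k.toNat ∣ x.toNat := by
    have : (k.toNat : Int) ∣ (x.toNat : Int) := by
      rwa [Int.toNat_of_nonneg (by omega : (0:Int) ≤ k),
           Int.toNat_of_nonneg (by omega : (0:Int) ≤ x)]
    exact_mod_cast this
  have := Nat.minFac_le_of_dvd (by omega : 2 ≤ k.toNat) hk'
  unfold spfI; omega

lemma spfI_sq_le {x : Int} (hx : 2 ≤ x) (hlt : spfI x < x) : spfI x * spfI x ≤ x := by
  have hnp : ¬ x.toNat.Prime := by
    intro hp
    have := (Nat.prime_def_minFac.mp hp).2
    unfold spfI at hlt; omega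
  have := Nat.minFac_sq_le_self (n := x.toNat) (by omega) hnp
  have h2 : x.toNat.minFac * x.toNat.minFac ≤ x.toNat := by
    simpa [pow_two] using this
  unfold spfI
  omega

-- B's while loop returns the smallest prime factor, from any start 2 ≤ d ≤ spf
lemma solutionGo_eq (x : Int) (hx : 2 ≤ x) :
    ∀ d, 2 ≤ d → d ≤ spfI x → solutionGo x d = spfI x := by
  intro d hd2 hdm
  induction hk : (spfI x - d).toNat using Nat.strong_induction_on generalizing d with
  | _ k ih =>
    rw [solutionGo]
    by_cases hsq : d * d ≤ x
    · simp only [hsq, dif_pos]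
      by_cases hdvd : PySem.Int.mod x d = 0
      · have : d ∣ x := (PySem.Int.mod_eq_zero_iff_dvd x d).mp hdvd
        have := spfI_min hx hd2 this
        simp [hdvd]; omega
      · have hne : d ≠ spfI x := by
          intro he
          exact hdvd ((PySem.Int.mod_eq_zero_iff_dvd x d).mpr (he ▸ spfI_dvd hx))
        have hlt : d < spfI x := lt_of_le_of_ne hdm hne
        simp only [hdvd, if_false]
        exact ih (spfI x - (d + 1)).toNat (by omega) (d + 1) (by omega) (by omega) rfl
    · simp only [hsq]
      -- no divisor ≤ sqrt x was found: x must be prime, spf x = x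
      by_contra hne
      have hlt : spfI x < x := lt_of_le_of_ne (spfI_le hx) (fun h => hne h.symm)
      have h1 : spfI x * spfI x ≤ x := spfI_sq_le hx hlt
      have h2 : d * d ≤ spfI x * spfI x := by nlinarith
      omega

-- A's inner loop over range(j, x) adds spf x - j, for any start 2 ≤ j ≤ spf
lemma solutionInner_eq (x : Int) (hx : 2 ≤ x) :
    ∀ j, 2 ≤ j → j ≤ spfI x → ∀ acc,
      solutionInner x (PySem.List.pyRange j x 1) acc = acc + (spfI x - j) := by
  intro j hj2 hjm acc
  induction hk : (spfI x - j).toNat using Nat.strong_induction_on generalizing j acc with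
  | _ k ih =>
    by_cases hje : j = spfI x
    · subst hje
      by_cases hlt : spfI x < x
      · rw [PySem.List.pyRange_one_cons hlt]
        have : PySem.Int.mod x (spfI x) = 0 :=
          (PySem.Int.mod_eq_zero_iff_dvd x (spfI x)).mpr (spfI_dvd hx)
        simp [solutionInner, this]
      · have hex : x ≤ spfI x := by omega
        rw [PySem.List.pyRange_one_eq_nil hex]
        simp [solutionInner]
    · have hjlt : j < spfI x := lt_of_le_of_ne hjm hje
      have hjx : j < x := lt_of_lt_of_le hjlt (spfI_le hx)
      rw [PySem.List.pyRange_one_cons hjx]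
      have hnd : PySem.Int.mod x j ≠ 0 := by
        intro h
        have := spfI_min hx hj2 ((PySem.Int.mod_eq_zero_iff_dvd x j).mp h)
        omega
      simp only [solutionInner, hnd, if_false]
      have := ih (spfI x - (j + 1)).toNat (by omega) (j + 1) (by omega) (by omega) (acc + 1) rfl
      omega

-- ===== VERDICT (by name: the statement is the Claim_ definition above) =====
theorem solution_spec : Claim_equal_solution := by
  intro n _
  unfold Spec_solution solution solution_alt
  apply PySem.List.foldl_congr_mem
  intro acc x hmem
  have hx : 2 ≤ x := ((PySem.List.mem_pyRange_one).mp hmem).1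
  rw [solutionInner_eq x hx 2 le_rfl (spfI_two_le hx) acc,
      solutionGo_eq x hx 2 le_rfl (spfI_two_le hx)]
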